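-- pv_equiv track=rewrite | github.com/jzhang-dev/whatshap-wmec-solver | src/whatshap_wmec_solver/whatshap_wmec_solver.py | _argsort_reads
-- ===== SOURCE A (Python) =====
-- from typing import Sequence
--
-- AlleleMatrix = Sequence[Sequence[int]]
--
-- def _argsort_reads(matrix: AlleleMatrix) -> Sequence[int]:
--     # Reads need to be sorted by the position of the first non-ambiguous variant.
--     # See https://github.com/whatshap/whatshap/blob/9882248c722b1020321fea6e9491c1cc5b75354b/src/columniterator.cpp (line #28)
--     def get_first_variant_position(read: Sequence[int]) -> int:
--         for i, allele in enumerate(read):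
--             if allele >= 0:
--                 return i
--         else:
--             raise ValueError(f"Read contains only ambiguous alleles: {read}")
--
--     read_indices = [(read, i) for i, read in enumerate(matrix)]
--     sorted_reads = list(
--         sorted(
--             [(read, i) for i, read in enumerate(matrix)],
--             key=lambda pair: get_first_variant_position(pair[0]),
--         )
--     )
--     sorted_indices = [pair[1] for pair in sorted_reads]
--     return sorted_indices
-- ===== SOURCE B (Python) =====
-- from typing import Sequence
--
-- AlleleMatrix = Sequence[Sequence[int]]
--
-- def _argsort_reads(matrix: AlleleMatrix) -> Sequence[int]:
--     # Bucket-style argsort: compute each read's first non-ambiguous position,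
--     # then emit read indices grouped by increasing position (stable by construction).
--     positions = []
--     for read in matrix:
--         for i, allele in enumerate(read):
--             if allele >= 0:
--                 positions.append(i)
--                 break
--         else:
--             raise ValueError(f"Read contains only ambiguous alleles: {read}")
--     if not positions:
--         return []
--     m = max(positions)
--     return [i for p in range(m + 1) for i, q in enumerate(positions) if q == p]
-- ===== Notes on version B (the rewrite author's own statement) =====
-- stated objective: alternative
-- what changed: Replaces A's stable sort of (read, index) pairs keyed by the first non-ambiguous position with a sort-free bucket scan: compute each read's first non-ambiguous position in one pass, then emit read indices grouped by increasing position value.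
import Mathlib
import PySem

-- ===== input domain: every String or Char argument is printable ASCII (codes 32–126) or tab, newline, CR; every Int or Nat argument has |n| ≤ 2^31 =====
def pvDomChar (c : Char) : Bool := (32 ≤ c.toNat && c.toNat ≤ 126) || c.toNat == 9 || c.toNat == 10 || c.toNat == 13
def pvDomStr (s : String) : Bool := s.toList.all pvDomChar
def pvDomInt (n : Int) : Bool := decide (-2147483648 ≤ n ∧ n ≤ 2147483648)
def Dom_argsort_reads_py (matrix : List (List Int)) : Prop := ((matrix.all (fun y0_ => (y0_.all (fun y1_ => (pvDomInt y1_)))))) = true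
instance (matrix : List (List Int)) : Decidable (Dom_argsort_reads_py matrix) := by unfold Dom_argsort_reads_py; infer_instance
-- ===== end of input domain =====

-- B replaces A's stable sort of (read, index) pairs with a bucket scan over first-variant
-- positions (objective: alternative algorithm, no sort).  Pre_ excludes matrices containing
-- an all-ambiguous read, on which Python A raises ValueError (B raises the same error).

-- ===== PORT A =====
-- 'get_first_variant_position': the for/enumerate loop with accumulator i.
-- On an all-ambiguous read Python raises ValueError; Pre_ excludes that case,
-- the fall-through value 0 here is never reached under Pre_.
def firstVarPosA : List Int → Int → Int
  | [], _ => 0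
  | a :: rest, i => if 0 ≤ a then i else firstVarPosA rest (i + 1)

def argsort_reads_py (matrix : List (List Int)) : List Int :=
  -- read_indices = [(read, i) for i, read in enumerate(matrix)]  (A computes it and never uses it)
  let _read_indices := (PySem.List.enumerate matrix 0).map (fun p => (p.2, p.1))
  let sorted_reads :=
    PySem.List.sorted ((PySem.List.enumerate matrix 0).map (fun p => (p.2, p.1)))
      (fun pair => firstVarPosA pair.1 0) false
  sorted_reads.map (fun pair => pair.2)

-- ===== PORT B =====
def argsort_reads_py_alt (matrix : List (List Int)) : List Int :=
  -- positions[j] = first index with allele ≥ 0 in read j (ValueError case excluded by Pre_)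
  let positions := matrix.map (fun read => read.findIdx (fun a => decide (0 ≤ a)))
  match positions with
  | [] => []
  | p0 :: rest =>
    let m := rest.foldl max p0   -- max(positions)
    (List.range (m + 1)).flatMap (fun p =>
      ((PySem.List.enumerate (p0 :: rest) 0).filter (fun q => q.2 = p)).map (fun q => q.1))

-- ===== PRECONDITION & SPEC =====
-- Pre_ excludes matrices with an all-ambiguous read (every allele < 0):
-- there Python A raises ValueError (and B raises the identical ValueError).
def Pre_argsort_reads_py (matrix : List (List Int)) : Prop :=
  ∀ read ∈ matrix, ∃ a ∈ read, 0 ≤ a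
instance (matrix : List (List Int)) : Decidable (Pre_argsort_reads_py matrix) := by
  unfold Pre_argsort_reads_py; infer_instance
def pvWitness_argsort_reads_py : List (List Int) := [[-1, 2], [0], [-1, -1, 3]]

def Spec_argsort_reads_py (matrix : List (List Int)) (out : List Int) : Prop := out = argsort_reads_py_alt matrix
instance (matrix : List (List Int)) (out : List Int) : Decidable (Spec_argsort_reads_py matrix out) := by unfold Spec_argsort_reads_py; infer_instance

-- ===== CLAIM (what is proved, stated in full; the proofs are below) =====
def Claim_equal_argsort_reads_py : Prop := ∀ (matrix : List (List Int)), Dom_argsort_reads_py matrix → Pre_argsort_reads_py matrix → Spec_argsort_reads_py matrix (argsort_reads_py matrix)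

-- ===== LEMMAS AND PROOFS =====

theorem insertBy_middle {α : Type} (before : α → α → Bool) (x : α) (A B : List α)
    (hA : ∀ a ∈ A, before x a = false)
    (hB : ∀ b ∈ B, before x b = true) :
    PySem.List.insertBy before x (A ++ B) = A ++ x :: B := by
  induction A with
  | nil =>
    cases B with
    | nil => simp [PySem.List.insertBy]
    | cons b bs => simp [PySem.List.insertBy, hB b (by simp)]
  | cons a as ih =>
    have := hA a (by simp)
    simp only [List.cons_append, PySem.List.insertBy, this, Bool.false_eq_true, if_false]
    rw [ih (fun a ha => hA a (by simp [ha]))]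

-- the bucket form of a list (filters over key values 0..M-1, in order)
def bucketed {α : Type} (key : α → Int) (M : Nat) (ys : List α) : List α :=
  (List.range M).flatMap (fun k : Nat => ys.filter (fun a => decide (key a = (k : Int))))

theorem bucketed_insert {α : Type} (key : α → Int) (M : Nat) (ys : List α) (x : α)
    (j : Nat) (hkx : key x = (j : Int)) (hjM : j < M) :
    PySem.List.insertBy (fun a b => decide (key a < key b)) x (bucketed key M ys)
      = bucketed key M (ys ++ [x]) := by
  have hsplit : M = (j + 1) + (M - (j + 1)) := by omega
  have hrange : List.range M = List.range (j + 1) ++ (List.range (M - (j + 1))).map (fun t => (j + 1) + t) := by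
    conv_lhs => rw [hsplit]
    exact List.range_add
  unfold bucketed
  rw [hrange, List.flatMap_append, List.flatMap_append]
  have hA : ∀ a ∈ (List.range (j + 1)).flatMap
      (fun k : Nat => ys.filter (fun a => decide (key a = (k : Int)))),
      (decide (key x < key a)) = false := by
    intro a ha
    simp only [List.mem_flatMap, List.mem_filter] at ha
    obtain ⟨k, hk, _, hka⟩ := ha
    have hkj : k < j + 1 := List.mem_range.mp hk
    have hka' : key a = (k : Int) := by simpa using hka
    simp only [decide_eq_false_iff_not, not_lt, hkx, hka']
    exact_mod_cast Nat.lt_succ_iff.mp hkj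
  have hB : ∀ b ∈ ((List.range (M - (j + 1))).map (fun t => (j + 1) + t)).flatMap
      (fun k : Nat => ys.filter (fun a => decide (key a = (k : Int)))),
      (decide (key x < key b)) = true := by
    intro b hb
    simp only [List.mem_flatMap, List.mem_map, List.mem_filter] at hb
    obtain ⟨k, ⟨k', _, hk'⟩, _, hkb⟩ := hb
    have hkb' : key b = (k : Int) := by simpa using hkb
    simp only [decide_eq_true_eq, hkx, hkb']
    have : j < k := by omega
    exact_mod_cast this
  rw [insertBy_middle _ _ _ _ hA hB]
  have hsmall : ∀ k ∈ List.range j,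
      (ys ++ [x]).filter (fun a => decide (key a = (k : Int)))
        = ys.filter (fun a => decide (key a = (k : Int))) := by
    intro k hk
    have hkj : k < j := List.mem_range.mp hk
    rw [List.filter_append]
    have hx : List.filter (fun a => decide (key a = (k : Int))) [x] = [] := by
      simp only [List.filter_cons, List.filter_nil, hkx]
      have : ¬ ((j : Int) = (k : Int)) := by intro h; omega
      simp [this]
    simp [hx]
  have hxj : List.filter (fun a => decide (key a = (j : Int))) [x] = [x] := by
    simp [hkx]
  have hAeq : (List.range (j + 1)).flatMap
        (fun k : Nat => (ys ++ [x]).filter (fun a => decide (key a = (k : Int))))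
      = (List.range (j + 1)).flatMap
        (fun k : Nat => ys.filter (fun a => decide (key a = (k : Int)))) ++ [x] := by
    rw [List.range_succ, List.flatMap_append, List.flatMap_append]
    simp only [List.flatMap_singleton]
    rw [List.flatMap_congr hsmall, List.filter_append, hxj, ← List.append_assoc]
  have hBeq : ((List.range (M - (j + 1))).map (fun t => (j + 1) + t)).flatMap
        (fun k : Nat => (ys ++ [x]).filter (fun a => decide (key a = (k : Int))))
      = ((List.range (M - (j + 1))).map (fun t => (j + 1) + t)).flatMap
        (fun k : Nat => ys.filter (fun a => decide (key a = (k : Int)))) := by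
    refine List.flatMap_congr ?_
    intro k hk
    simp only [List.mem_map, List.mem_range] at hk
    obtain ⟨k', _, hk'⟩ := hk
    rw [List.filter_append]
    have hx : List.filter (fun a => decide (key a = (k : Int))) [x] = [] := by
      simp only [List.filter_cons, List.filter_nil, hkx]
      have : ¬ ((j : Int) = (k : Int)) := by intro h; omega
      simp [this]
    simp [hx]
  rw [hAeq, hBeq]
  simp [List.append_assoc]

theorem sorted_eq_bucketed {α : Type} (key : α → Int) (M : Nat) (xs : List α)
    (h : ∀ a ∈ xs, ∃ j : Nat, key a = (j : Int) ∧ j < M) :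
    PySem.List.sorted xs key false = bucketed key M xs := by
  rw [PySem.List.sorted_eq_foldl_insertBy]
  induction xs using List.reverseRecOn with
  | nil => simp [bucketed]
  | append_singleton ys x ih =>
    rw [List.foldl_append]
    simp only [List.foldl_cons, List.foldl_nil]
    rw [ih (fun a ha => h a (by simp [ha]))]
    obtain ⟨j, hj, hjM⟩ := h x (by simp)
    exact bucketed_insert key M ys x j hj hjM

-- under Pre_, A's key equals B's findIdx-based position (generalized over the accumulator)
theorem firstVarPosA_eq_findIdx (read : List Int) (i : Nat)
    (h : ∃ a ∈ read, 0 ≤ a) :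
    firstVarPosA read (i : Int) = ((i + read.findIdx (fun a => decide (0 ≤ a)) : Nat) : Int) := by
  induction read generalizing i with
  | nil => simp at h
  | cons a rest ih =>
    by_cases ha : 0 ≤ a
    · simp [firstVarPosA, ha, List.findIdx_cons]
    · have h' : ∃ b ∈ rest, 0 ≤ b := by
        obtain ⟨b, hb, hb0⟩ := h
        rcases List.mem_cons.mp hb with rfl | hb'
        · exact absurd hb0 ha
        · exact ⟨b, hb', hb0⟩
      have hcast : (i : Int) + 1 = ((i + 1 : Nat) : Int) := by push_cast; ring
      have hstep : firstVarPosA (a :: rest) (i : Int) = firstVarPosA rest ((i : Int) + 1) := by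
        simp only [firstVarPosA, ha, if_false]
      rw [hstep, hcast, ih (i + 1) h', List.findIdx_cons]
      have hdec : (decide ((0:Int) ≤ a)) = false := decide_eq_false ha
      rw [hdec]
      simp only [cond_false]
      push_cast; omega

-- enumerate commutes with map on the elements
theorem enumerate_map {α β : Type} (f : α → β) (xs : List α) (s : Int) :
    PySem.List.enumerate (xs.map f) s = (PySem.List.enumerate xs s).map (fun p => (p.1, f p.2)) := by
  induction xs generalizing s with
  | nil => simp [PySem.List.enumerate_nil]
  | cons x rest ih => simp [PySem.List.enumerate_cons, ih]

-- each member of an enumeration has its second component in the list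
theorem snd_mem_of_mem_enumerate {α : Type} {xs : List α} {s : Int} {p : Int × α}
    (hp : p ∈ PySem.List.enumerate xs s) : p.2 ∈ xs := by
  have := PySem.List.map_snd_enumerate xs s
  rw [← this]
  exact List.mem_map_of_mem hp

-- ===== VERDICT (by name: the statement is the Claim_ definition above) =====
theorem argsort_reads_py_spec : Claim_equal_argsort_reads_py := by
  intro matrix _hdom hpre
  unfold Spec_argsort_reads_py argsort_reads_py argsort_reads_py_alt
  cases matrix with
  | nil => simp [PySem.List.enumerate_nil, PySem.List.sorted]
  | cons r0 rs =>
    simp only [List.map_cons]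
    set key := fun (pair : List Int × Int) => firstVarPosA pair.1 0 with hkey
    set fIdx := fun (read : List Int) => read.findIdx (fun a => decide (0 ≤ a)) with hfIdx
    set m := (rs.map fIdx).foldl max (fIdx r0) with hmdef
    -- every key is a Nat < m+1
    have hkeys : ∀ pair ∈ (PySem.List.enumerate (r0 :: rs) 0).map (fun p => (p.2, p.1)),
        ∃ j : Nat, key pair = (j : Int) ∧ j < m + 1 := by
      intro pair hpair
      simp only [List.mem_map] at hpair
      obtain ⟨p, hp, rfl⟩ := hpair
      have hmem : p.2 ∈ r0 :: rs := snd_mem_of_mem_enumerate hp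
      have hex := hpre p.2 hmem
      refine ⟨fIdx p.2, ?_, ?_⟩
      · have := firstVarPosA_eq_findIdx p.2 0 hex
        simpa [hkey, hfIdx] using this
      · have hor : fIdx p.2 = fIdx r0 ∨ fIdx p.2 ∈ rs.map fIdx := by
          rcases List.mem_cons.mp hmem with h | h
          · left; rw [h]
          · right; exact List.mem_map_of_mem h
        obtain ⟨h1, h2⟩ := PySem.List.le_foldl_max (rs.map fIdx) (fIdx r0)
        rcases hor with h | h
        · rw [h]; omega
        · have := h2 _ h; omega
    rw [sorted_eq_bucketed key (m + 1) _ hkeys]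
    unfold bucketed
    rw [List.map_flatMap]
    refine List.flatMap_congr ?_
    intro k hk
    rw [show List.findIdx (fun a => decide ((0:Int) ≤ a)) r0 :: List.map fIdx rs = (r0 :: rs).map fIdx from rfl]
    rw [enumerate_map]
    rw [List.filter_map, List.filter_map, List.map_map, List.map_map]
    have hfun : ((fun (pair : List Int × Int) => pair.2) ∘ (fun (p : Int × List Int) => (p.2, p.1)))
        = ((fun (q : Int × Nat) => q.1) ∘ (fun (p : Int × List Int) => (p.1, fIdx p.2))) := rfl
    rw [hfun]
    congr 1
    refine List.filter_congr ?_
    intro p hp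
    have hmem : p.2 ∈ r0 :: rs := snd_mem_of_mem_enumerate hp
    have hex := hpre p.2 hmem
    have hkeyp : key (p.2, p.1) = ((fIdx p.2 : Nat) : Int) := by
      have := firstVarPosA_eq_findIdx p.2 0 hex
      simpa [hkey, hfIdx] using this
    simp only [Function.comp_apply, hkeyp, decide_eq_decide]
    exact ⟨fun h => by exact_mod_cast h, fun h => by exact_mod_cast h⟩
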